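-- pv_equiv track=rewrite | github.com/SpicyIcy00/ultra-supabotv2 | backend/app/services/chart_intelligence.py | _find_units_column
-- ===== SOURCE A (Python) =====
-- from typing import Any, Dict, List, Tuple
--
-- def _find_units_column(data_profile: Dict[str, Any]) -> str | None:
--     """Find units/quantity column for tooltip metadata."""
--     numeric_cols = data_profile.get("numeric_columns", [])
--     units_priorities = ['units', 'quantity', 'qty', 'units_sold']
--
--     for priority_col in units_priorities:
--         for col in numeric_cols:
--             if col.lower() == priority_col:
--                 return col
--
--     return None
-- ===== SOURCE B (Python) =====
-- def _find_units_column(data_profile):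
--     """Find units/quantity column for tooltip metadata."""
--     priorities = ['units', 'quantity', 'qty', 'units_sold']
--     best = None  # (rank, col) with the smallest rank seen, first occurrence wins
--     for col in data_profile.get("numeric_columns", []):
--         low = col.lower()
--         if low in priorities:
--             r = priorities.index(low)
--             if best is None or r < best[0]:
--                 best = (r, col)
--     return best[1] if best is not None else None
-- ===== Notes on version B (the rewrite author's own statement) =====
-- stated objective: alternative
-- what changed: Inverts the traversal: a single left-to-right pass over the columns maintaining a (best-rank, column) accumulator (strict '<' so the first occurrence of the best rank wins), instead of A's nested scan of every column per priority name.
import Mathlib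
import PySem

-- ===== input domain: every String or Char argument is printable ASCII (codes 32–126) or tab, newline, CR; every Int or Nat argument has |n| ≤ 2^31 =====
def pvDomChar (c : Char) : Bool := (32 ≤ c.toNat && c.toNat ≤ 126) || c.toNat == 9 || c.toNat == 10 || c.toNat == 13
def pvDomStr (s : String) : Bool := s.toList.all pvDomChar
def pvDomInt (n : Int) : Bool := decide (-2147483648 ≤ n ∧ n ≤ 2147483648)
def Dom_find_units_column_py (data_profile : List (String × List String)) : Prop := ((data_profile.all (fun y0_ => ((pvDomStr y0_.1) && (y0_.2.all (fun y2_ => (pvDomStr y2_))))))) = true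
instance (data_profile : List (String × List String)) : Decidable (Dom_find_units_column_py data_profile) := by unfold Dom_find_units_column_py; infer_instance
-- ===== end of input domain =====

-- B replaces A's nested priority-then-column scan by a single pass over the columns that
-- maintains a (best-rank, column) accumulator (objective: alternative decomposition).

-- ===== PORT A =====
-- Port of A: data_profile.get("numeric_columns", []) is a first-match assoc lookup;
-- the nested 'for priority / for col' loops with early return are findSome?/find?.
def find_units_column_py (data_profile : List (String × List String)) : Option String :=
  let numeric_cols := (data_profile.lookup "numeric_columns").getD []
  let units_priorities := ["units", "quantity", "qty", "units_sold"]
  units_priorities.findSome? (fun priority_col =>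
    numeric_cols.find? (fun col => PySem.Str.lower col == priority_col))

-- ===== PORT B =====
-- Port of B: one foldl over the columns carrying an Option (rank, col) accumulator;
-- 'low in priorities' is List.contains, 'priorities.index(low)' is PySem.List.index?.
def find_units_column_py_alt (data_profile : List (String × List String)) : Option String :=
  let priorities := ["units", "quantity", "qty", "units_sold"]
  let best : Option (Nat × String) :=
    ((data_profile.lookup "numeric_columns").getD []).foldl
      (fun best col =>
        let low := PySem.Str.lower col
        if priorities.contains low then
          match PySem.List.index? priorities low with
          | some r =>
            match best with
            | none => some (r, col)
            | some b => if r < b.1 then some (r, col) else best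
          | none => best
        else best)
      none
  best.map Prod.snd

-- ===== PRECONDITION & SPEC =====
def Spec_find_units_column_py (data_profile : List (String × List String)) (out : Option String) : Prop := out = find_units_column_py_alt data_profile
instance (data_profile : List (String × List String)) (out : Option String) : Decidable (Spec_find_units_column_py data_profile out) := by unfold Spec_find_units_column_py; infer_instance

-- ===== CLAIM (what is proved, stated in full; the proofs are below) =====
def Claim_equal_find_units_column_py : Prop := ∀ (data_profile : List (String × List String)), Dom_find_units_column_py data_profile → Spec_find_units_column_py data_profile (find_units_column_py data_profile)

-- ===== LEMMAS AND PROOFS =====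

-- Left-biased minimum on optional (rank, col) pairs: the value B's accumulator tracks.
def pvMergeBest (b y : Option (Nat × String)) : Option (Nat × String) :=
  match b, y with
  | none, y => y
  | b, none => b
  | some b, some y => if y.1 < b.1 then some y else some b

-- What A computes over a column list, annotated with the rank it came from.
def pvBestSpec (cols : List String) : Option (Nat × String) :=
  match cols.find? (fun col => PySem.Str.lower col == "units") with
  | some c => some (0, c)
  | none =>
    match cols.find? (fun col => PySem.Str.lower col == "quantity") with
    | some c => some (1, c)
    | none =>
      match cols.find? (fun col => PySem.Str.lower col == "qty") with
      | some c => some (2, c)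
      | none =>
        match cols.find? (fun col => PySem.Str.lower col == "units_sold") with
        | some c => some (3, c)
        | none => none

theorem pvMergeBest_assoc (a b c : Option (Nat × String)) :
    pvMergeBest (pvMergeBest a b) c = pvMergeBest a (pvMergeBest b c) := by
  rcases a with _ | a <;> rcases b with _ | b <;> rcases c with _ | c <;>
    simp only [pvMergeBest] <;>
    (repeat' first
      | rfl
      | (exfalso; omega)
      | split_ifs <;> try simp only [pvMergeBest])

-- One step of B's fold is a pvMergeBest with the rank of the new column.
theorem pvStep_eq_merge (b : Option (Nat × String)) (col : String) :
    (let low := PySem.Str.lower col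
     if ["units", "quantity", "qty", "units_sold"].contains low then
       match PySem.List.index? ["units", "quantity", "qty", "units_sold"] low with
       | some r =>
         match b with
         | none => some (r, col)
         | some p => if r < p.1 then some (r, col) else b
       | none => b
     else b) = pvMergeBest b (pvBestSpec [col]) := by
  by_cases h0 : PySem.Str.lower col = "units"
  · have hidx : List.idxOf? "units" ["units", "quantity", "qty", "units_sold"] = some 0 := by
      decide
    rcases b with _ | b <;> simp [h0, hidx, pvBestSpec, pvMergeBest]
  · by_cases h1 : PySem.Str.lower col = "quantity"
    · have hidx : List.idxOf? "quantity" ["units", "quantity", "qty", "units_sold"] = some 1 := by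
        decide
      rcases b with _ | b <;> simp [h0, h1, hidx, pvBestSpec, pvMergeBest]
    · by_cases h2 : PySem.Str.lower col = "qty"
      · have hidx : List.idxOf? "qty" ["units", "quantity", "qty", "units_sold"] = some 2 := by
          decide
        rcases b with _ | b <;> simp [h0, h1, h2, hidx, pvBestSpec, pvMergeBest]
      · by_cases h3 : PySem.Str.lower col = "units_sold"
        · have hidx : List.idxOf? "units_sold" ["units", "quantity", "qty", "units_sold"] = some 3 := by
            decide
          rcases b with _ | b <;> simp [h0, h1, h2, h3, hidx, pvBestSpec, pvMergeBest]
        · rcases b with _ | b <;>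
            simp [pvBestSpec, pvMergeBest, h0, h1, h2, h3]

-- pvBestSpec distributes over cons via pvMergeBest.
theorem pvBestSpec_cons (c : String) (cs : List String) :
    pvBestSpec (c :: cs) = pvMergeBest (pvBestSpec [c]) (pvBestSpec cs) := by
  by_cases h0 : PySem.Str.lower c = "units"
  · simp [pvBestSpec, pvMergeBest, h0]
    cases cs.find? (fun col => PySem.Str.lower col == "units") <;>
    cases cs.find? (fun col => PySem.Str.lower col == "quantity") <;>
    cases cs.find? (fun col => PySem.Str.lower col == "qty") <;>
    cases cs.find? (fun col => PySem.Str.lower col == "units_sold") <;>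
      simp [pvMergeBest]
  · by_cases h1 : PySem.Str.lower c = "quantity"
    · simp [pvBestSpec, pvMergeBest, h0, h1]
      cases cs.find? (fun col => PySem.Str.lower col == "units") <;>
      cases cs.find? (fun col => PySem.Str.lower col == "quantity") <;>
      cases cs.find? (fun col => PySem.Str.lower col == "qty") <;>
      cases cs.find? (fun col => PySem.Str.lower col == "units_sold") <;>
        simp [pvMergeBest]
    · by_cases h2 : PySem.Str.lower c = "qty"
      · simp [pvBestSpec, pvMergeBest, h0, h1, h2]
        cases cs.find? (fun col => PySem.Str.lower col == "units") <;>
        cases cs.find? (fun col => PySem.Str.lower col == "quantity") <;>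
        cases cs.find? (fun col => PySem.Str.lower col == "qty") <;>
        cases cs.find? (fun col => PySem.Str.lower col == "units_sold") <;>
          simp [pvMergeBest]
      · by_cases h3 : PySem.Str.lower c = "units_sold"
        · simp [pvBestSpec, pvMergeBest, h0, h1, h2, h3]
          cases cs.find? (fun col => PySem.Str.lower col == "units") <;>
          cases cs.find? (fun col => PySem.Str.lower col == "quantity") <;>
          cases cs.find? (fun col => PySem.Str.lower col == "qty") <;>
          cases cs.find? (fun col => PySem.Str.lower col == "units_sold") <;>
            simp [pvMergeBest]
        · simp [pvBestSpec, h0, h1, h2, h3]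
          cases pvBestSpec cs <;> simp [pvMergeBest]

-- B's fold computes pvMergeBest of the accumulator with pvBestSpec of the columns.
theorem pvFold_eq_bestSpec (cols : List String) (b : Option (Nat × String)) :
    cols.foldl
      (fun best col =>
        let low := PySem.Str.lower col
        if ["units", "quantity", "qty", "units_sold"].contains low then
          match PySem.List.index? ["units", "quantity", "qty", "units_sold"] low with
          | some r =>
            match best with
            | none => some (r, col)
            | some p => if r < p.1 then some (r, col) else best
          | none => best
        else best)
      b = pvMergeBest b (pvBestSpec cols) := by
  induction cols generalizing b with
  | nil => cases b <;> simp [pvBestSpec, pvMergeBest]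
  | cons c cs ih =>
    simp only [List.foldl_cons]
    rw [ih, pvStep_eq_merge, pvMergeBest_assoc, ← pvBestSpec_cons]

-- ===== VERDICT (by name: the statement is the Claim_ definition above) =====
theorem find_units_column_py_spec : Claim_equal_find_units_column_py := by
  intro dp _
  unfold Spec_find_units_column_py
  simp only [find_units_column_py, find_units_column_py_alt]
  rw [pvFold_eq_bestSpec]
  simp only [List.findSome?, pvMergeBest, pvBestSpec]
  cases ((dp.lookup "numeric_columns").getD []).find? (fun col => PySem.Str.lower col == "units") <;>
  cases ((dp.lookup "numeric_columns").getD []).find? (fun col => PySem.Str.lower col == "quantity") <;>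
  cases ((dp.lookup "numeric_columns").getD []).find? (fun col => PySem.Str.lower col == "qty") <;>
  cases ((dp.lookup "numeric_columns").getD []).find? (fun col => PySem.Str.lower col == "units_sold") <;>
    simp
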